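-- pv_equiv track=rewrite | github.com/elrion018/CS_study | beakjoon_PS/no17140.py | r_operation
-- ===== SOURCE A (Python) =====
-- def dic_to_list(arr):
-- 		dic_converted_list = []
-- 		temp = sorted(list(arr.items()), key = lambda element: (element[1], element[0]))
--
-- 		for i in range(len(temp)):
-- 			for j in range(2):
-- 				dic_converted_list.append(temp[i][j])
--
-- 		if len(dic_converted_list) > 100:
-- 			return dic_converted_list[:100]
--
-- 		return dic_converted_list
--
-- def r_operation(arr):
-- 		dic = dict()
-- 		max_length = 0
-- 		number_and_count_arr = []
--
-- 		for y in range(len(arr)):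
-- 			for x in range(len(arr[0])):
-- 				if arr[y][x] != 0:
-- 					if arr[y][x] in dic:
-- 						dic[arr[y][x]] += 1
-- 					else:
-- 						dic[arr[y][x]] = 1
--
-- 			dic_converted_list = dic_to_list(dic)
-- 			max_length = max(max_length, len(dic_converted_list))
-- 			number_and_count_arr.append(dic_converted_list)
-- 			dic = dict()
--
-- 		operated_arr = [[0]*(max_length) for _ in range(len(number_and_count_arr))]
--
-- 		for y in range(len(number_and_count_arr)):
-- 			for x in range(len(number_and_count_arr[y])):
-- 				operated_arr[y][x] = number_and_count_arr[y][x]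
--
--
-- 		return operated_arr
-- ===== SOURCE B (Python) =====
-- def r_operation(arr):
--     width = len(arr[0]) if arr else 0
--     rows = []
--     for row in arr:
--         vals = sorted(x for x in row[:width] if x != 0)
--         # run-length encode the sorted values: equal values are adjacent
--         runs = []
--         i = 0
--         while i < len(vals):
--             j = i
--             while j < len(vals) and vals[j] == vals[i]:
--                 j += 1
--             runs.append((vals[i], j - i))
--             i = j
--         runs.sort(key=lambda p: (p[1], p[0]))
--         rows.append([e for p in runs for e in p][:100])
--     m = max((len(r) for r in rows), default=0)
--     return [r + [0] * (m - len(r)) for r in rows]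
-- ===== Notes on version B (the rewrite author's own statement) =====
-- stated objective: alternative
-- what changed: B counts each row's values by sorting the nonzero values and run-length-encoding the sorted list with an index-scanning loop (equal values are adjacent), instead of A's incremental dict accumulation; B then pads rows by appending zeros instead of A's preallocated zero matrix overwritten by nested index assignments.
import Mathlib
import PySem

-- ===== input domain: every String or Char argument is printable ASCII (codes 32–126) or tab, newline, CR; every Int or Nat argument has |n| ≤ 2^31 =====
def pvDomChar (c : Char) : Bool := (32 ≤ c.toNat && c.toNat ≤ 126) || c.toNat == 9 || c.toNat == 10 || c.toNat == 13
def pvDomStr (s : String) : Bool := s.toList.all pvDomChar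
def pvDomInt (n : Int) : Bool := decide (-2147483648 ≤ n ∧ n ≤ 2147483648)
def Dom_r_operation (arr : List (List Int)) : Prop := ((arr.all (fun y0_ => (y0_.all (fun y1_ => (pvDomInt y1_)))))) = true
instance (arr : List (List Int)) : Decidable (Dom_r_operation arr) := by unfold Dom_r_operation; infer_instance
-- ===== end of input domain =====

-- B counts each row's values by sorting the nonzero values and run-length-encoding the sorted
-- list, instead of A's dict accumulation + flatten-into-a-preallocated-zero-matrix (objective:
-- alternative decomposition, same cost class).

-- ===== PORT A =====
def dic_to_list (arr : PySem.Dict Int Int) : List Int :=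
  let temp := PySem.List.sorted2 arr.items (fun e => e.2) (fun e => e.1)
  -- 'for j in range(2)' over the pair temp[i] is ported as appending its two components
  let dicConverted := (PySem.List.pyRange 0 (PySem.List.len temp)).foldl
    (fun acc i => let t := PySem.List.pyGetD temp i (0, 0); acc ++ [t.1, t.2]) []
  if dicConverted.length > 100 then dicConverted.take 100 else dicConverted

def r_operation (arr : List (List Int)) : List (List Int) :=
  let st := (PySem.List.pyRange 0 (PySem.List.len arr)).foldl
    (fun (st : Int × List (List Int)) y =>
      let dic := (PySem.List.pyRange 0 (PySem.List.len (PySem.List.pyGetD arr 0 []))).foldl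
        (fun (dic : PySem.Dict Int Int) x =>
          if PySem.List.pyGetD (PySem.List.pyGetD arr y []) x 0 ≠ 0 then
            if dic.contains (PySem.List.pyGetD (PySem.List.pyGetD arr y []) x 0) then
              dic.insert (PySem.List.pyGetD (PySem.List.pyGetD arr y []) x 0)
                (dic.getD (PySem.List.pyGetD (PySem.List.pyGetD arr y []) x 0) 0 + 1)
            else dic.insert (PySem.List.pyGetD (PySem.List.pyGetD arr y []) x 0) 1
          else dic)
        PySem.Dict.empty
      (max st.1 (PySem.List.len (dic_to_list dic)), st.2 ++ [dic_to_list dic]))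
    (0, [])
  let maxLength := st.1
  let rows := st.2
  let operated := (PySem.List.pyRange 0 (PySem.List.len rows)).map
    (fun _ => PySem.List.pyRepeat [0] maxLength)
  (PySem.List.pyRange 0 (PySem.List.len rows)).foldl
    (fun op (y : Int) =>
      (PySem.List.pyRange 0 (PySem.List.len (PySem.List.pyGetD rows y []))).foldl
        (fun op (x : Int) =>
          -- 'operated_arr[y][x] = number_and_count_arr[y][x]' (indices from range, hence nonnegative)
          op.set y.toNat ((PySem.List.pyGetD op y []).set x.toNat
            (PySem.List.pyGetD (PySem.List.pyGetD rows y []) x 0)))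
        op)
    operated

-- ===== PORT B =====
-- transcription of B's two while loops: the inner 'while vals[j] == vals[i]' advances j past the
-- run of vals[i] (= takeWhile on the tail, run length j - i = takeWhile.length + 1), the outer
-- loop continues at i = j (= recursion on dropWhile)
def pvRunsGo : Nat → List Int → List (Int × Int)
  | _, [] => []
  | 0, _ :: _ => []   -- never reached: the fuel is the list length
  | Nat.succ n, v :: t => (v, ((t.takeWhile (fun x => x == v)).length + 1 : Int)) ::
      pvRunsGo n (t.dropWhile (fun x => x == v))

def pvRuns (l : List Int) : List (Int × Int) := pvRunsGo l.length l

def r_operation_alt (arr : List (List Int)) : List (List Int) :=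
  let width : Int := match arr with | [] => 0 | r :: _ => PySem.List.len r
  let rows := arr.map (fun row =>
    let vals := PySem.List.sorted
      ((PySem.List.slice row none (some width)).filter (fun x => decide (x ≠ 0))) (fun x => x)
    let runs := pvRuns vals
    -- 'runs.sort(key=lambda p: (p[1], p[0]))' sorts the local list in place
    let pairs := PySem.List.sorted2 runs (fun p => p.2) (fun p => p.1)
    (pairs.flatMap (fun p => [p.1, p.2])).take 100)
  let m : Int := PySem.List.maxD (rows.map (fun r => PySem.List.len r)) (fun x => x) 0
  rows.map (fun r => r ++ PySem.List.pyRepeat [0] (m - PySem.List.len r))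

-- ===== PRECONDITION & SPEC =====
-- A indexes every row with range(len(arr[0])): it raises IndexError whenever some row is shorter
-- than the first one; Pre_ excludes exactly those inputs (longer rows stay in: both truncate them).
def Pre_r_operation (arr : List (List Int)) : Prop :=
  ∀ row ∈ arr, (arr.headD []).length ≤ row.length
instance (arr : List (List Int)) : Decidable (Pre_r_operation arr) := by
  unfold Pre_r_operation; infer_instance

def pvWitness_r_operation : List (List Int) := [[1, 2, 1], [0, 0, 0]]

def Spec_r_operation (arr : List (List Int)) (out : List (List Int)) : Prop := out = r_operation_alt arr
instance (arr : List (List Int)) (out : List (List Int)) : Decidable (Spec_r_operation arr out) := by unfold Spec_r_operation; infer_instance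

-- ===== CLAIM (what is proved, stated in full; the proofs are below) =====
def Claim_equal_r_operation : Prop := ∀ (arr : List (List Int)), Dom_r_operation arr → Pre_r_operation arr → Spec_r_operation arr (r_operation arr)

-- ===== LEMMAS AND PROOFS =====

-- the per-row value A computes from its dict (proof-only abbreviation)
def pvRow (w : Nat) (row : List Int) : List Int :=
  dic_to_list (PySem.Dict.counter ((row.take w).filter (fun x => decide (x ≠ 0))))

-- 'len(arr[0]) if arr else 0' is the length of the first row (or 0)
theorem widthIn_eq (arr : List (List Int)) :
    (match arr with | [] => (0 : Int) | r :: _ => PySem.List.len r) = ((arr.headD []).length : Int) := by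
  cases arr <;> simp [PySem.List.len]

-- range(len(xs)) has len(xs) elements
theorem length_pyRange_len {α : Type} (xs : List α) :
    (PySem.List.pyRange 0 (PySem.List.len xs)).length = xs.length := by
  rw [show PySem.List.len xs = ((xs.length : Nat) : Int) from rfl, PySem.List.pyRange_zero_natCast]
  simp

-- sorted2 is sorted with the lexicographic pair key
theorem sorted2_eq_sorted_lex {α : Type} (xs : List α) (k1 k2 : α → Int) :
    PySem.List.sorted2 xs k1 k2 = PySem.List.sorted xs (fun a => toLex (k1 a, k2 a)) := by
  have hb : (fun a b => decide (k1 a < k1 b) || (!decide (k1 b < k1 a) && decide (k2 a < k2 b)))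
      = (fun a b => decide ((toLex ((k1 a), (k2 a)) : Lex (Int × Int)) < toLex ((k1 b), (k2 b)))) := by
    funext a b
    by_cases h1 : k1 a < k1 b
    · simp [h1, Prod.Lex.toLex_lt_toLex]
    · by_cases h2 : k1 b < k1 a
      · have h3 : ¬ (k1 a = k1 b) := by omega
        simp [h1, h2, h3, Prod.Lex.toLex_lt_toLex]
      · have h3 : k1 a = k1 b := by omega
        simp [h3, Prod.Lex.toLex_lt_toLex]
  show List.foldl _ [] xs = List.foldl _ [] xs
  rw [hb]

-- run-length encoding of a SORTED list: distinct first components covering the list, counts exact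
-- on a sorted list whose elements all dominate v, everything after the v-run exceeds v
theorem dropWhile_gt (v : Int) (t : List Int) (h : t.Pairwise (· ≤ ·))
    (hvt : ∀ x ∈ t, v ≤ x) : ∀ x ∈ t.dropWhile (fun x => x == v), v < x := by
  induction t with
  | nil => simp
  | cons y ys ih =>
    rw [List.dropWhile_cons]
    split
    · exact ih (List.pairwise_cons.1 h).2 (fun x hx => hvt x (List.mem_cons_of_mem y hx))
    · rename_i hy
      intro x hx
      have hyv : v < y := lt_of_le_of_ne (hvt y (by simp)) (fun e => hy (by simp [e.symm]))
      rcases List.mem_cons.1 hx with rfl | hx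
      · exact hyv
      · have := (List.pairwise_cons.1 h).1 x hx
        omega

theorem pvRunsGo_sorted_spec (n : Nat) : ∀ l : List Int, l.length ≤ n → l.Pairwise (· ≤ ·) →
    ((pvRunsGo n l).map Prod.fst).Nodup ∧ (∀ x, x ∈ (pvRunsGo n l).map Prod.fst ↔ x ∈ l) ∧
      (∀ p ∈ pvRunsGo n l, p.2 = (l.count p.1 : Int)) := by
  induction n with
  | zero =>
    intro l hl _
    have : l = [] := List.eq_nil_of_length_eq_zero (by omega)
    subst this
    simp [pvRunsGo]
  | succ n ih =>
    intro l hl h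
    cases l with
    | nil => simp [pvRunsGo]
    | cons v t =>
      obtain ⟨a, b, ha, hb⟩ : ∃ a b, a = t.takeWhile (fun x => x == v) ∧
          b = t.dropWhile (fun x => x == v) := ⟨_, _, rfl, rfl⟩
      have hab : a ++ b = t := by rw [ha, hb]; exact List.takeWhile_append_dropWhile
      have hva : ∀ x ∈ a, x = v := by
        intro x hx
        rw [ha] at hx
        have := List.mem_takeWhile_imp hx
        simpa using this
      have hvt : ∀ x ∈ t, v ≤ x := by
        intro x hx
        exact (List.pairwise_cons.1 h).1 x hx
      have hsb : b.Pairwise (· ≤ ·) := by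
        rw [hb]
        exact ((List.pairwise_cons.1 h).2).sublist (List.dropWhile_sublist _)
      have hvb : ∀ x ∈ b, v < x := by
        rw [hb]
        exact dropWhile_gt v t (List.pairwise_cons.1 h).2 hvt
      have hblen : b.length ≤ n := by
        have h1 : b.length ≤ t.length := by rw [hb]; exact List.length_dropWhile_le _ t
        simp only [List.length_cons] at hl
        omega
      obtain ⟨ihnd, ihmem, ihcnt⟩ := ih b hblen hsb
      refine ⟨?_, ?_, ?_⟩
      · rw [pvRunsGo, ← hb]
        simp only [List.map_cons, List.nodup_cons]
        refine ⟨?_, ihnd⟩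
        intro hvmem
        have := (ihmem v).1 hvmem
        exact absurd ((hvb v) this) (lt_irrefl v)
      · intro x
        rw [pvRunsGo, ← hb]
        simp only [List.map_cons, List.mem_cons, ihmem, ← hab]
        constructor
        · rintro (rfl | hx)
          · simp
          · right; exact List.mem_append_right a hx
        · rintro (rfl | hx)
          · left; rfl
          · rcases List.mem_append.1 hx with hx | hx
            · left; exact hva x hx
            · right; exact hx
      · intro p hp
        rw [pvRunsGo, ← ha, ← hb] at hp
        rcases List.mem_cons.1 hp with rfl | hp
        · simp only []
          have hca : a.count v = a.length := List.count_eq_length.2 (by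
            intro x hx; have := hva x hx; simp [this])
          have hcb0 : b.count v = 0 := List.count_eq_zero.2 (by
            intro hvm; exact absurd (hvb v hvm) (lt_irrefl v))
          have : (v :: t).count v = a.length + 1 := by
            rw [List.count_cons_self, ← hab, List.count_append, hca, hcb0]
          rw [this]
          push_cast
          ring
        · have hp1b : p.1 ∈ b := (ihmem p.1).1 (List.mem_map_of_mem hp)
          have hne : p.1 ≠ v := by
            have := hvb p.1 hp1b; omega
          have hca0 : a.count p.1 = 0 := List.count_eq_zero.2 (by
            intro hm; exact hne (hva p.1 hm))
          have : (v :: t).count p.1 = b.count p.1 := by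
            rw [← hab]
            simp [List.count_cons, List.count_append, hca0]
            omega
          rw [this]
          exact ihcnt p hp

theorem pvRuns_sorted_spec (l : List Int) (h : l.Pairwise (· ≤ ·)) :
    ((pvRuns l).map Prod.fst).Nodup ∧ (∀ x, x ∈ (pvRuns l).map Prod.fst ↔ x ∈ l) ∧
      (∀ p ∈ pvRuns l, p.2 = (l.count p.1 : Int)) :=
  pvRunsGo_sorted_spec l.length l le_rfl h

-- RLE of the sorted values is a permutation of Counter(vals).items()
theorem pvRuns_perm_items (vals : List Int) :
    (pvRuns (PySem.List.sorted vals (fun x => x))).Perm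
      ((PySem.Set.ofList vals).map (fun k => (k, (vals.count k : Int)))) := by
  set s := PySem.List.sorted vals (fun x => x) with hs
  have hperm : s.Perm vals := PySem.List.sorted_perm _ _ _
  have hsort : s.Pairwise (· ≤ ·) := by
    have := PySem.List.sorted_pairwise vals (fun x => x)
    exact this
  obtain ⟨hnd, hmem, hcnt⟩ := pvRuns_sorted_spec s hsort
  have hfst : ((pvRuns s).map Prod.fst).Perm (PySem.Set.ofList vals) := by
    rw [List.perm_ext_iff_of_nodup hnd (PySem.Set.nodup_ofList vals)]
    intro x
    rw [hmem x, PySem.Set.mem_ofList, hperm.mem_iff]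
  have hperm2 := hfst.map (fun k => (k, (vals.count k : Int)))
  rw [List.map_map] at hperm2
  have hself : (pvRuns s).map ((fun k => (k, (vals.count k : Int))) ∘ Prod.fst) = pvRuns s := by
    conv_rhs => rw [← List.map_id (pvRuns s)]
    apply List.map_congr_left
    intro p hp
    rcases p with ⟨pv, pc⟩
    have h2 := hcnt (pv, pc) hp
    have h3 : s.count pv = vals.count pv := hperm.count_eq pv
    simp only [Function.comp, id]
    rw [Prod.mk.injEq]
    refine ⟨rfl, ?_⟩
    simp only [] at h2
    omega
  rw [← hself]
  exact hperm2

-- B's per-row computation produces A's dic_to_list of the row Counter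
theorem rowB_eq (row : List Int) (w : Nat) :
    ((PySem.List.sorted2
        (pvRuns (PySem.List.sorted ((row.take w).filter (fun x => decide (x ≠ 0))) (fun x => x)))
        (fun p => p.2) (fun p => p.1)).flatMap (fun p => [p.1, p.2])).take 100
      = pvRow w row := by
  unfold pvRow dic_to_list
  set vals := (row.take w).filter (fun x => decide (x ≠ 0)) with hvals
  simp only []
  rw [PySem.Dict.items_counter]
  set items := (PySem.Set.ofList vals).map (fun k => (k, (vals.count k : Int))) with hitems
  have hkeyinj : Function.Injective (fun (e : Int × Int) => (toLex (e.2, e.1) : Lex (Int × Int))) := by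
    intro p q h
    have := congrArg (fun (x : Lex (Int × Int)) => ofLex x) h
    simp only [ofLex_toLex] at this
    exact Prod.ext (congrArg Prod.snd this) (congrArg Prod.fst this)
  have hsortedEq : PySem.List.sorted2 (pvRuns (PySem.List.sorted vals (fun x => x)))
      (fun p => p.2) (fun p => p.1) = PySem.List.sorted2 items (fun e => e.2) (fun e => e.1) := by
    rw [sorted2_eq_sorted_lex, sorted2_eq_sorted_lex]
    exact PySem.List.sorted_eq_sorted_of_perm _ _ _ hkeyinj (pvRuns_perm_items vals)
  rw [hsortedEq]
  set temp := PySem.List.sorted2 items (fun e => e.2) (fun e => e.1) with htemp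
  have hfold : (PySem.List.pyRange 0 (PySem.List.len temp)).foldl
      (fun acc i => acc ++ [(PySem.List.pyGetD temp i (0, 0)).1, (PySem.List.pyGetD temp i (0, 0)).2]) ([] : List Int)
      = temp.flatMap (fun t => [t.1, t.2]) := by
    rw [← List.foldl_map (f := fun (j : Int) => PySem.List.pyGetD temp j ((0 : Int), (0 : Int)))
          (g := fun (acc : List Int) (t : Int × Int) => acc ++ [t.1, t.2]),
        PySem.List.map_pyGetD_pyRange_zero,
        PySem.List.foldl_append_eq_flatMap]
    simp
  rw [hfold]
  by_cases h : (temp.flatMap (fun t => [t.1, t.2])).length > 100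
  · rw [if_pos h]
  · rw [if_neg h, List.take_of_length_le (by omega)]

-- A's dict loop over the column indices builds Counter of the nonzero prefix values
theorem dict_loop_eq_counter (row : List Int) (w : Nat) (hw : w ≤ row.length) :
    (PySem.List.pyRange 0 (w : Int)).foldl
      (fun (dic : PySem.Dict Int Int) x =>
        if PySem.List.pyGetD row x 0 ≠ 0 then
          if dic.contains (PySem.List.pyGetD row x 0) then
            dic.insert (PySem.List.pyGetD row x 0) (dic.getD (PySem.List.pyGetD row x 0) 0 + 1)
          else dic.insert (PySem.List.pyGetD row x 0) 1
        else dic)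
      PySem.Dict.empty
    = PySem.Dict.counter ((row.take w).filter (fun x => decide (x ≠ 0))) := by
  have hlen : PySem.List.len (row.take w) = (w : Int) := by
    simp [PySem.List.len, List.length_take, Nat.min_eq_left hw]
  have h1 : ∀ x ∈ PySem.List.pyRange 0 (w : Int), ∀ (dic : PySem.Dict Int Int),
      (fun (dic : PySem.Dict Int Int) (x : Int) =>
        if PySem.List.pyGetD row x 0 ≠ 0 then
          if dic.contains (PySem.List.pyGetD row x 0) then
            dic.insert (PySem.List.pyGetD row x 0) (dic.getD (PySem.List.pyGetD row x 0) 0 + 1)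
          else dic.insert (PySem.List.pyGetD row x 0) 1
        else dic) dic x
      = (fun (dic : PySem.Dict Int Int) (x : Int) =>
        if PySem.List.pyGetD (row.take w) x 0 ≠ 0 then
          if dic.contains (PySem.List.pyGetD (row.take w) x 0) then
            dic.insert (PySem.List.pyGetD (row.take w) x 0) (dic.getD (PySem.List.pyGetD (row.take w) x 0) 0 + 1)
          else dic.insert (PySem.List.pyGetD (row.take w) x 0) 1
        else dic) dic x := by
    intro x hx dic
    have hx' := PySem.List.mem_pyRange_one.1 hx
    have hget : PySem.List.pyGetD row x 0 = PySem.List.pyGetD (row.take w) x 0 := by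
      rw [PySem.List.pyGetD_eq_getElem row 0 hx'.1 (by omega),
          PySem.List.pyGetD_eq_getElem (row.take w) 0 hx'.1 (by rw [List.length_take]; push_cast; omega)]
      rw [List.getElem_take]
    simp only [hget]
  rw [PySem.List.foldl_congr_mem' _ _ _ _ h1, ← hlen]
  rw [← List.foldl_map (f := fun (j : Int) => PySem.List.pyGetD (row.take w) j 0)
        (g := fun (dic : PySem.Dict Int Int) v => if v ≠ 0 then (if dic.contains v then dic.insert v (dic.getD v 0 + 1) else dic.insert v 1) else dic),
      PySem.List.map_pyGetD_pyRange_zero]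
  rw [PySem.List.foldl_ite_eq_foldl_filter (fun v => v ≠ 0)
        (fun (dic : PySem.Dict Int Int) v => if dic.contains v then dic.insert v (dic.getD v 0 + 1) else dic.insert v 1)]
  rw [PySem.Dict.counter_eq_foldl]
  apply PySem.List.foldl_congr_mem' _ _ _ _
  intro v hv dic
  by_cases hc : dic.contains v
  · simp only [hc, if_pos, PySem.Dict.modify]
  · rw [if_neg hc, PySem.Dict.modify, PySem.Dict.getD_of_not_contains dic 0 (by simpa using hc), zero_add]

-- Python max(xs, default=0) on nonnegative ints is the running-max loop from 0
theorem maxD_id_nonneg (xs : List Int) (h : ∀ x ∈ xs, 0 ≤ x) :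
    PySem.List.maxD xs (fun x => x) 0 = xs.foldl max 0 := by
  cases xs with
  | nil => rfl
  | cons x t =>
    unfold PySem.List.maxD
    rw [PySem.List.max?_id_cons]
    simp only [Option.getD_some, List.foldl_cons]
    rw [max_eq_right (h x (by simp))]

-- filling a row by index assignments writes r over the front of z
theorem fill_loop (r : List Int) : ∀ (k : Nat) (z : List Int), k ≤ r.length → r.length ≤ z.length →
    (PySem.List.pyRange (k : Int) (PySem.List.len r)).foldl
      (fun z (x : Int) => z.set x.toNat (PySem.List.pyGetD r x 0)) z
    = z.take k ++ r.drop k ++ z.drop r.length := by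
  intro k z hk hz
  induction hn : r.length - k generalizing k z with
  | zero =>
    have hk' : k = r.length := by omega
    subst hk'
    rw [PySem.List.pyRange_one_eq_nil (by simp [PySem.List.len])]
    simp [List.take_append_drop]
  | succ n ih =>
    have hklt : k < r.length := by omega
    rw [PySem.List.pyRange_one_cons (by simp [PySem.List.len]; omega), List.foldl_cons]
    have hget : PySem.List.pyGetD r (k : Int) 0 = r[k] := by
      rw [PySem.List.pyGetD_natCast, List.getD_eq_getElem r 0 hklt]
    rw [Int.toNat_natCast, hget]
    have hcast : ((k : Int) + 1) = ((k + 1 : Nat) : Int) := by push_cast; ring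
    rw [hcast, ih (k+1) (z.set k r[k]) (by omega) (by simpa using hz) (by omega)]
    have h1 : (z.set k r[k]).take (k+1) = z.take k ++ [r[k]] := by
      have hkz : k < z.length := lt_of_lt_of_le hklt hz
      rw [List.take_set, List.take_add_one, List.getElem?_eq_getElem hkz]
      simp only [Option.toList_some]
      rw [List.set_append_right k r[k] (by simp [List.length_take])]
      simp [List.length_take, Nat.min_eq_left (le_of_lt hkz)]
    have h2 : (z.set k r[k]).drop r.length = z.drop r.length := by
      rw [List.drop_set, if_pos hklt]
    have h3 : r.drop k = r[k] :: r.drop (k+1) := List.drop_eq_getElem_cons hklt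
    rw [h1, h2, h3]
    simp [List.append_assoc]

-- the inner x-loop touches only row yn of op
theorem collapse (yn : Nat) (g : Int → Int) : ∀ (l : List Int) (op : List (List Int)), yn < op.length →
    l.foldl (fun op (x : Int) =>
        op.set yn ((PySem.List.pyGetD op (yn : Int) []).set x.toNat (g x))) op
    = op.set yn (l.foldl (fun z (x : Int) => z.set x.toNat (g x))
        (PySem.List.pyGetD op (yn : Int) [])) := by
  intro l
  induction l with
  | nil =>
    intro op hy
    simp only [List.foldl_nil]
    rw [PySem.List.pyGetD_natCast, List.getD_eq_getElem op [] hy, List.set_getElem_self hy]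
  | cons x t ih =>
    intro op hy
    simp only [List.foldl_cons]
    rw [ih _ (by simpa using hy)]
    have hget : PySem.List.pyGetD (op.set yn ((PySem.List.pyGetD op (yn:Int) []).set x.toNat (g x))) (yn : Int) []
        = (PySem.List.pyGetD op (yn:Int) []).set x.toNat (g x) := by
      rw [PySem.List.pyGetD_natCast, List.getD_eq_getElem _ [] (by simpa using hy),
          List.getElem_set_self]
    rw [hget, List.set_set]

-- the outer y-loop fills the rows one after another
theorem outer_loop (rows : List (List Int)) (zrow : List Int) :
    ∀ (k : Nat) (pref : List (List Int)), pref.length = k → k ≤ rows.length →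
    (PySem.List.pyRange (k : Int) (PySem.List.len rows)).foldl
      (fun op (y : Int) =>
        (PySem.List.pyRange 0 (PySem.List.len (PySem.List.pyGetD rows y []))).foldl
          (fun op (x : Int) => op.set y.toNat ((PySem.List.pyGetD op y []).set x.toNat
              (PySem.List.pyGetD (PySem.List.pyGetD rows y []) x 0))) op)
      (pref ++ List.replicate (rows.length - k) zrow)
    = pref ++ (rows.drop k).map (fun r =>
        (PySem.List.pyRange 0 (PySem.List.len r)).foldl
          (fun z (x : Int) => z.set x.toNat (PySem.List.pyGetD r x 0)) zrow) := by
  intro k pref hp hk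
  induction hn : rows.length - k generalizing k pref with
  | zero =>
    have hk' : k = rows.length := by omega
    subst hk'
    rw [PySem.List.pyRange_one_eq_nil (by simp [PySem.List.len])]
    simp
  | succ n ih =>
    have hklt : k < rows.length := by omega
    rw [PySem.List.pyRange_one_cons (by simp [PySem.List.len]; omega), List.foldl_cons]
    simp only [Int.toNat_natCast]
    rw [show n + 1 = (rows.length - (k+1)) + 1 from by omega, List.replicate_succ]
    have hoplen : k < (pref ++ zrow :: List.replicate (rows.length - (k+1)) zrow).length := by
      simp [hp]
    have hrk : PySem.List.pyGetD rows (k : Int) [] = rows[k] := by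
      rw [PySem.List.pyGetD_natCast, List.getD_eq_getElem rows [] hklt]
    rw [collapse k (fun x => PySem.List.pyGetD (PySem.List.pyGetD rows (k:Int) []) x 0) _ _ hoplen]
    have hz : PySem.List.pyGetD (pref ++ zrow :: List.replicate (rows.length - (k+1)) zrow) (k : Int) []
        = zrow := by
      rw [PySem.List.pyGetD_natCast, List.getD_eq_getElem _ [] hoplen,
          List.getElem_append_right (by omega)]
      simp [hp]
    rw [hz, hrk]
    set v := (PySem.List.pyRange 0 (PySem.List.len rows[k])).foldl
        (fun z (x : Int) => z.set x.toNat (PySem.List.pyGetD rows[k] x 0)) zrow with hv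
    have hset : (pref ++ zrow :: List.replicate (rows.length - (k+1)) zrow).set k v
        = (pref ++ [v]) ++ List.replicate (rows.length - (k+1)) zrow := by
      rw [List.set_append_right k v (by omega), hp]
      simp
    rw [hset]
    have hcast : ((k : Int) + 1) = ((k + 1 : Nat) : Int) := by push_cast; ring
    rw [show rows.length - (k+1) = n from by omega] at *
    rw [hcast, ih (k+1) (pref ++ [v]) (by simp [hp]) (by omega) (by omega)]
    have hdrop : rows.drop k = rows[k] :: rows.drop (k+1) := List.drop_eq_getElem_cons hklt
    rw [hdrop]
    simp [hv]
    rw [List.drop_eq_getElem_cons (show k < (List.map (fun r => List.foldl (fun z (x : Int) => z.set x.toNat (PySem.List.pyGetD r x 0)) zrow (PySem.List.pyRange 0 (↑r.length : Int))) rows).length by simpa using hklt)]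
    simp

-- ===== VERDICT (by name: the statement is the Claim_ definition above) =====
theorem r_operation_spec : Claim_equal_r_operation := by
  intro arr _ hpre
  unfold Spec_r_operation
  set w := (arr.headD []).length with hwdef
  have hget0 : PySem.List.pyGetD arr 0 [] = arr.headD [] := by
    rw [show (0 : Int) = ((0 : Nat) : Int) from rfl, PySem.List.pyGetD_natCast]
    cases arr <;> rfl
  have hw : ∀ row ∈ arr, w ≤ row.length := hpre
  -- both sides will be brought to this common form
  set rowsF := arr.map (pvRow w) with hrowsF
  set maxA := rowsF.foldl (fun m r => max m (PySem.List.len r)) 0 with hmaxA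
  have hmax := PySem.List.le_foldl_max_int rowsF (fun r => PySem.List.len r) 0
  have hmax0 : 0 ≤ maxA := hmax.1
  have hmaxr : ∀ r ∈ rowsF, (r.length : Int) ≤ maxA := fun r hr => hmax.2 r hr
  have hB : r_operation_alt arr
      = rowsF.map (fun r => r ++ List.replicate (maxA.toNat - r.length) 0) := by
    simp only [r_operation_alt]
    rw [widthIn_eq arr, ← hwdef]
    have hslice : ∀ row : List Int, PySem.List.slice row none (some (w : Int)) = row.take w := by
      intro row
      rw [PySem.List.slice_to row (by positivity), Int.toNat_natCast]
    simp only [hslice]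
    have hmapF : arr.map (fun row =>
        ((PySem.List.sorted2
            (pvRuns (PySem.List.sorted ((row.take w).filter (fun x => decide (x ≠ 0))) (fun x => x)))
            (fun p => p.2) (fun p => p.1)).flatMap (fun p => [p.1, p.2])).take 100) = rowsF := by
      rw [hrowsF]
      exact List.map_congr_left (fun row _ => rowB_eq row w)
    rw [hmapF]
    have hwidth : PySem.List.maxD (rowsF.map (fun r => PySem.List.len r)) (fun x => x) 0 = maxA := by
      rw [maxD_id_nonneg _ (by
        intro x hx
        obtain ⟨r, _, hr⟩ := List.mem_map.1 hx
        simp [← hr, PySem.List.len])]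
      rw [List.foldl_map, hmaxA]
    rw [hwidth]
    apply List.map_congr_left
    intro r hr
    rw [PySem.List.pyRepeat_singleton]
    have h1 : (r.length : Int) ≤ maxA := hmaxr r hr
    have h2 : (maxA - PySem.List.len r).toNat = maxA.toNat - r.length := by
      simp only [PySem.List.len]; omega
    rw [h2]
  have hA : r_operation arr
      = rowsF.map (fun r => r ++ List.replicate (maxA.toNat - r.length) 0) := by
    simp only [r_operation]
    rw [← List.foldl_map (f := fun (j : Int) => PySem.List.pyGetD arr j [])
          (g := fun (st : Int × List (List Int)) (row : List Int) =>
            (max st.1 (PySem.List.len (dic_to_list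
              ((PySem.List.pyRange 0 (PySem.List.len (PySem.List.pyGetD arr 0 []))).foldl
                (fun (dic : PySem.Dict Int Int) x =>
                  if PySem.List.pyGetD row x 0 ≠ 0 then
                    if dic.contains (PySem.List.pyGetD row x 0) then
                      dic.insert (PySem.List.pyGetD row x 0) (dic.getD (PySem.List.pyGetD row x 0) 0 + 1)
                    else dic.insert (PySem.List.pyGetD row x 0) 1
                  else dic)
                PySem.Dict.empty))),
             st.2 ++ [dic_to_list
              ((PySem.List.pyRange 0 (PySem.List.len (PySem.List.pyGetD arr 0 []))).foldl
                (fun (dic : PySem.Dict Int Int) x =>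
                  if PySem.List.pyGetD row x 0 ≠ 0 then
                    if dic.contains (PySem.List.pyGetD row x 0) then
                      dic.insert (PySem.List.pyGetD row x 0) (dic.getD (PySem.List.pyGetD row x 0) 0 + 1)
                    else dic.insert (PySem.List.pyGetD row x 0) 1
                  else dic)
                PySem.Dict.empty)])),
        PySem.List.map_pyGetD_pyRange_zero]
    have hlen0 : PySem.List.len (PySem.List.pyGetD arr 0 []) = (w : Int) := by
      rw [hget0]; simp [PySem.List.len, hwdef]
    rw [hlen0]
    have hrowA : ∀ row ∈ arr, dic_to_list
        ((PySem.List.pyRange 0 (w : Int)).foldl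
          (fun (dic : PySem.Dict Int Int) x =>
            if PySem.List.pyGetD row x 0 ≠ 0 then
              if dic.contains (PySem.List.pyGetD row x 0) then
                dic.insert (PySem.List.pyGetD row x 0) (dic.getD (PySem.List.pyGetD row x 0) 0 + 1)
              else dic.insert (PySem.List.pyGetD row x 0) 1
            else dic)
          PySem.Dict.empty)
        = pvRow w row := by
      intro row hr
      rw [dict_loop_eq_counter row w (hw row hr)]
      rfl
    rw [PySem.List.foldl_congr_mem' arr _
          (fun (st : Int × List (List Int)) (row : List Int) =>
            (max st.1 (PySem.List.len (pvRow w row)), st.2 ++ [pvRow w row]))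
          (0, [])
          (by intro row hr st; rw [hrowA row hr])]
    rw [PySem.List.foldl_prod_mk (f := fun m row => max m (PySem.List.len (pvRow w row)))
          (g := fun acc row => acc ++ [pvRow w row])]
    rw [PySem.List.foldl_append_singleton_eq_map (f := fun row => pvRow w row)]
    simp only [List.nil_append]
    have hmaxEq : arr.foldl (fun m row => max m (PySem.List.len (pvRow w row))) 0 = maxA := by
      rw [hmaxA, hrowsF, List.foldl_map]
    rw [hmaxEq, ← hrowsF]
    -- the zero matrix
    rw [List.map_const', PySem.List.pyRepeat_singleton, length_pyRange_len]
    have houter := outer_loop rowsF (List.replicate maxA.toNat 0) 0 [] rfl (Nat.zero_le _)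
    simp only [Nat.cast_zero, Nat.sub_zero, List.nil_append, List.drop_zero] at houter
    rw [houter]
    apply List.map_congr_left
    intro r hr
    have hrW : r.length ≤ maxA.toNat := by
      have := hmaxr r hr
      omega
    have := fill_loop r 0 (List.replicate maxA.toNat 0) (Nat.zero_le _) (by simpa using hrW)
    simp only [Nat.cast_zero, List.take_zero, List.drop_zero, List.nil_append] at this
    rw [this, List.drop_replicate]
  rw [hA, hB]
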